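-- pv_equiv track=rewrite | github.com/luckashish/HackerRankProblemsSolutions | jewel game.py | getMaxScore
-- ===== SOURCE A (Python) =====
-- def getMaxScore(jewels):
--     # Write your code here
--     # Write your code here
--     temp_list = [jewels[0]]
--     count = 0
--     for jewel in jewels[1:]:
--         if len(temp_list) != 0 and temp_list[-1] == jewel:
--             while len(temp_list) != 0 and temp_list[-1] == jewel:
--                 temp_list.pop()
--                 count += 1
--         else:
--             temp_list.append(jewel)
--     return count
-- ===== SOURCE B (Python) =====
-- def getMaxScore(jewels):
--     # Repeated-scan reduction: each pass deletes every adjacent equal pair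
--     # left-to-right; repeat until a pass removes nothing. Each removed pair
--     # contributed 1 to the score, so the answer is (removed elements) // 2.
--     work = list(jewels)
--     while True:
--         new = []
--         i = 0
--         while i < len(work):
--             if i + 1 < len(work) and work[i] == work[i + 1]:
--                 i += 2
--             else:
--                 new.append(work[i])
--                 i += 1
--         if len(new) == len(work):
--             return (len(jewels) - len(work)) // 2
--         work = new
-- ===== Notes on version B (the rewrite author's own statement) =====
-- stated objective: alternative
-- what changed: Replaces A's one-pass stack matching (pop on equal top, count per pop) with a repeated full-scan reduction that deletes every adjacent equal pair per pass until a fixpoint, returning (removed elements)//2; correctness rests on confluence of adjacent-pair cancellation.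
-- crash fix: On the empty list A raises IndexError reading the first element; B naturally returns 0. — e.g. on getMaxScore([]): A raises IndexError, B returns 0
import Mathlib
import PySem

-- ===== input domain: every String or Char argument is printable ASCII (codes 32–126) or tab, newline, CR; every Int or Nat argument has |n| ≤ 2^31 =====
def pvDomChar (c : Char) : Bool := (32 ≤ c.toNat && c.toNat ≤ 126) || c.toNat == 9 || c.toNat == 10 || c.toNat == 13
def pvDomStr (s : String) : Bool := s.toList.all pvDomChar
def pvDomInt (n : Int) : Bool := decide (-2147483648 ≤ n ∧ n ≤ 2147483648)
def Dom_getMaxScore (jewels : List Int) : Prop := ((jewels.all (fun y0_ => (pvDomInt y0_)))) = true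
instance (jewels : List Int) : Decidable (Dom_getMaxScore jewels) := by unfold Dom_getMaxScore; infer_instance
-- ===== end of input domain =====

-- B replaces A's single stack pass by a repeated adjacent-pair-deletion scan (alternative
-- decomposition, same exact count); equivalence of the return values is proved on nonempty lists.

-- ===== PORT A =====
-- temp_list is kept top-first (head = Python's temp_list[-1]); pop/append act on the head.
def popWhileA : List Int → Int → Int → List Int × Int
  | [], _, c => ([], c)
  | t :: rest, j, c => if t = j then popWhileA rest j (c + 1) else (t :: rest, c)

def stepA (st : List Int × Int) (j : Int) : List Int × Int :=
  match st with
  | (tl, c) =>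
    match tl with
    | [] => (j :: tl, c)                               -- len(temp_list) == 0: append
    | t :: rest =>
      if t = j then popWhileA (t :: rest) j c          -- the inner while loop
      else (j :: t :: rest, c)                         -- append

def getMaxScore (jewels : List Int) : Int :=
  match jewels with
  | [] => 0                                            -- Python raises IndexError here (first-element read); excluded by Pre_
  | j0 :: rest => (rest.foldl stepA ([j0], 0)).2       -- temp_list = [jewels[0]], loop over jewels[1:]

-- ===== PORT B =====
-- one left-to-right scan deleting every adjacent equal pair (Source B's inner while over i)
def bpass : List Int → List Int
  | [] => []
  | [x] => [x]
  | x :: y :: r => if x = y then bpass r else x :: bpass (y :: r)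

theorem bpass_length_le (l : List Int) : (bpass l).length ≤ l.length := by
  induction l using bpass.induct with
  | case1 => simp [bpass]
  | case2 x => simp [bpass]
  | case3 y r ih =>
    rw [show bpass (y :: y :: r) = bpass r from by simp [bpass]]
    refine le_trans ih ?_; simp; omega
  | case4 x y r hne ih => rw [bpass, if_neg hne]; simpa using ih

-- Source B's outer while True loop: repeat the pass until it removes nothing
def bLoop (n : Int) (work : List Int) : Int :=
  if h : (bpass work).length = work.length then
    PySem.Int.floordiv (n - work.length) 2
  else bLoop n (bpass work)
termination_by work.length
decreasing_by have := bpass_length_le work; omega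

def getMaxScore_alt (jewels : List Int) : Int := bLoop jewels.length jewels

-- ===== PRECONDITION & SPEC =====
-- Pre_ excludes only the empty list, on which A raises IndexError reading the first element.
def Pre_getMaxScore (jewels : List Int) : Prop := jewels ≠ []
instance (jewels : List Int) : Decidable (Pre_getMaxScore jewels) := by unfold Pre_getMaxScore; infer_instance
def pvWitness_getMaxScore : List Int := [1, 1, 2]

-- On the empty list A raises IndexError reading the first element; B naturally returns 0 (proved below as getMaxScore_raises).
def Raises_getMaxScore (jewels : List Int) : Prop := jewels = []
instance (jewels : List Int) : Decidable (Raises_getMaxScore jewels) := by unfold Raises_getMaxScore; infer_instance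
def pvRaiseWitness_getMaxScore : List Int := []
def pvRaiseWitnessOut_getMaxScore : Int := 0

def Spec_getMaxScore (jewels : List Int) (out : Int) : Prop := out = getMaxScore_alt jewels
instance (jewels : List Int) (out : Int) : Decidable (Spec_getMaxScore jewels out) := by unfold Spec_getMaxScore; infer_instance

-- ===== CLAIM (what is proved, stated in full; the proofs are below) =====
def Claim_equal_getMaxScore : Prop := ∀ (jewels : List Int), Dom_getMaxScore jewels → Pre_getMaxScore jewels → Spec_getMaxScore jewels (getMaxScore jewels)
def Claim_raises_getMaxScore : Prop := (∀ (jewels : List Int), Dom_getMaxScore jewels → Raises_getMaxScore jewels → ¬ Pre_getMaxScore jewels) ∧ (Dom_getMaxScore (pvRaiseWitness_getMaxScore) ∧ Raises_getMaxScore (pvRaiseWitness_getMaxScore) ∧ getMaxScore_alt (pvRaiseWitness_getMaxScore) = pvRaiseWitnessOut_getMaxScore)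

-- ===== LEMMAS AND PROOFS =====

-- stacks never contain two adjacent equal elements
def NoAdj (l : List Int) : Prop := List.IsChain (fun a b => a ≠ b) l

-- the simple one-step stack transition both proofs are phrased with
def stk (S : List Int) (j : Int) : List Int := if S.head? = some j then S.tail else j :: S

theorem noAdj_stk {S : List Int} (j : Int) (h : NoAdj S) : NoAdj (stk S j) := by
  unfold stk
  split
  · exact h.tail
  · next hh =>
    refine List.isChain_cons.2 ⟨?_, h⟩
    intro y hy e
    exact hh (e ▸ Option.mem_def.mp hy)

theorem stepA_eq {S : List Int} {c : Int} {j : Int} (h : NoAdj S) :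
    stepA (S, c) j = (stk S j, if S.head? = some j then c + 1 else c) := by
  cases S with
  | nil => simp [stepA, stk]
  | cons t rest =>
    by_cases ht : t = j
    · subst ht
      have hhd : ∀ y ∈ rest.head?, t ≠ y := (List.isChain_cons.1 h).1
      cases rest with
      | nil => simp [stepA, popWhileA, stk]
      | cons t' r' =>
        have h2 : t' ≠ t := fun e => hhd t' (by simp) e.symm
        simp [stepA, popWhileA, stk, h2]
    · simp [stepA, stk, fun e : t = j => ht e]

theorem foldA (l : List Int) : ∀ (S : List Int) (c : Int), NoAdj S →
    (List.foldl stepA (S, c) l).1 = List.foldl stk S l ∧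
    2 * (List.foldl stepA (S, c) l).2 + ((List.foldl stk S l).length : Int)
      = 2 * c + S.length + l.length ∧
    NoAdj (List.foldl stk S l) := by
  induction l with
  | nil => intro S c h; simpa using h
  | cons j rest ih =>
    intro S c h
    rw [List.foldl_cons, List.foldl_cons, stepA_eq h]
    obtain ⟨h1, h2, h3⟩ := ih (stk S j) (if S.head? = some j then c + 1 else c) (noAdj_stk j h)
    refine ⟨h1, ?_, h3⟩
    rw [h2]
    unfold stk
    split
    · next hh =>
      cases S with
      | nil => simp at hh
      | cons a t => simp only [List.tail_cons, List.length_cons]; push_cast; omega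
    · simp only [List.length_cons]; push_cast; omega

theorem stk_stk {S : List Int} (a : Int) (h : NoAdj S) : stk (stk S a) a = S := by
  unfold stk
  split
  · next hh =>
    cases S with
    | nil => simp at hh
    | cons t rest =>
      have hhd : ∀ y ∈ rest.head?, t ≠ y := (List.isChain_cons.1 h).1
      have ha : t = a := by simpa using hh
      subst ha
      cases rest with
      | nil => simp
      | cons t' r' =>
        have h2 : t' ≠ t := fun e => hhd t' (by simp) e.symm
        simp [h2]
  · simp

theorem foldl_stk_bpass : ∀ (l S : List Int), NoAdj S →
    List.foldl stk S (bpass l) = List.foldl stk S l := by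
  intro l
  induction l using bpass.induct with
  | case1 => intro S h; simp [bpass]
  | case2 x => intro S h; simp [bpass]
  | case3 y r ih =>
    intro S h
    rw [show bpass (y :: y :: r) = bpass r by simp [bpass], ih S h]
    simp [stk_stk y h]
  | case4 x y r hxy ih =>
    intro S h
    simp only [bpass, if_neg hxy, List.foldl_cons]
    exact ih (stk S x) (noAdj_stk x h)

theorem bpass_eq_of_length : ∀ l : List Int, (bpass l).length = l.length → bpass l = l := by
  intro l
  induction l using bpass.induct with
  | case1 => simp [bpass]
  | case2 x => simp [bpass]
  | case3 y r ih =>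
    intro hl
    have := bpass_length_le r
    rw [show bpass (y :: y :: r) = bpass r by simp [bpass]] at hl
    simp at hl; omega
  | case4 x y r hxy ih =>
    intro hl
    simp only [bpass, if_neg hxy, List.length_cons] at hl ⊢
    rw [ih (by simp only [List.length_cons]; omega)]

theorem noAdj_of_fix : ∀ l : List Int, bpass l = l → NoAdj l := by
  intro l
  induction l using bpass.induct with
  | case1 => intro _; simp [NoAdj]
  | case2 x => intro _; simp [NoAdj]
  | case3 y r ih =>
    intro hfix
    have h1 := bpass_length_le r
    rw [show bpass (y :: y :: r) = bpass r by simp [bpass]] at hfix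
    have := congrArg List.length hfix
    simp at this; omega
  | case4 x y r hxy ih =>
    intro hfix
    simp only [bpass, if_neg hxy] at hfix
    have h2 : bpass (y :: r) = y :: r := by injection hfix
    exact List.isChain_cons.2 ⟨by intro z hz; simp at hz; subst hz; exact hxy, ih h2⟩

theorem foldl_stk_noAdj : ∀ (l S : List Int), NoAdj l →
    (∀ a, S.head? = some a → ¬ l.head? = some a) → List.foldl stk S l = l.reverse ++ S := by
  intro l
  induction l with
  | nil => intro S _ _; simp
  | cons x rest ih =>
    intro S hl hc
    have hpush : stk S x = x :: S := by
      unfold stk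
      split
      · next hh => exact absurd (by simp) (hc x hh)
      · rfl
    rw [List.foldl_cons, hpush,
      ih (x :: S) ((List.isChain_cons.1 hl).2)
        (by intro a ha hr
            simp at ha; subst ha
            exact (List.isChain_cons.1 hl).1 _ (Option.mem_def.mpr hr) rfl)]
    simp

theorem bLoop_formula : ∀ (n : Int) (work : List Int),
    bLoop n work = PySem.Int.floordiv (n - (List.foldl stk [] work).length) 2 := by
  intro n work
  induction work using bLoop.induct with
  | case1 work h =>
    rw [bLoop, dif_pos h]
    have hfix := bpass_eq_of_length work h
    have hnoadj := noAdj_of_fix work hfix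
    have := foldl_stk_noAdj work [] hnoadj (by intro a ha; simp at ha)
    rw [this]
    simp
  | case2 work h ih =>
    rw [bLoop, dif_neg h, ih, foldl_stk_bpass work [] (by simp [NoAdj])]

-- ===== VERDICT (by name: the statement is the Claim_ definition above) =====
theorem getMaxScore_spec : Claim_equal_getMaxScore := by
  unfold Claim_equal_getMaxScore
  intro jewels _ hpre
  unfold Spec_getMaxScore getMaxScore getMaxScore_alt
  match jewels, hpre with
  | j0 :: rest, _ =>
    obtain ⟨_, h2, _⟩ := foldA rest [j0] 0 (by simp [NoAdj])
    have hS : List.foldl stk [j0] rest = List.foldl stk [] (j0 :: rest) := by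
      simp [stk]
    rw [bLoop_formula, ← hS, PySem.Int.floordiv_eq_ediv_of_pos (by omega : (0:Int) < 2)]
    simp only [List.length_cons, List.length_nil] at h2 ⊢
    push_cast at h2 ⊢
    omega

def getMaxScore_raises : Claim_raises_getMaxScore := by
  unfold Claim_raises_getMaxScore
  refine ⟨fun jewels _ hr hp => hp hr, by decide, by decide, ?_⟩
  show bLoop (([] : List Int).length : Int) [] = 0
  rw [bLoop]
  decide
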